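-- pv_equiv track=rewrite | github.com/asafkessler/6130_Python | Final Exam/q1_last.py | recursive_sum_max
-- ===== SOURCE A (Python) =====
-- def recursive_sum_max(board, starting_point):
--     if not board:
--         return 0
--
--     curr_row = board.pop(0)
--     curr_max_index = curr_row.index(max(curr_row))
--     max_value = curr_row[curr_max_index]
--
--     adjustment = -1 * int(curr_max_index != starting_point)
--
--     return max_value + adjustment + recursive_sum_max(board, curr_max_index)
-- ===== SOURCE B (Python) =====
-- def recursive_sum_max(board, starting_point):
--     total = 0
--     while board:
--         row = board.pop(0)
--         m = max(row)
--         i = row.index(m)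
--         total += m - (i != starting_point)
--         starting_point = i
--     return total
-- ===== Notes on version B (the rewrite author's own statement) =====
-- stated objective: simpler
-- what changed: Replaces the recursion with an explicit while-loop accumulating a running total and threading the previous max-index, and adds the max value directly instead of re-indexing the row.
import Mathlib
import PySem

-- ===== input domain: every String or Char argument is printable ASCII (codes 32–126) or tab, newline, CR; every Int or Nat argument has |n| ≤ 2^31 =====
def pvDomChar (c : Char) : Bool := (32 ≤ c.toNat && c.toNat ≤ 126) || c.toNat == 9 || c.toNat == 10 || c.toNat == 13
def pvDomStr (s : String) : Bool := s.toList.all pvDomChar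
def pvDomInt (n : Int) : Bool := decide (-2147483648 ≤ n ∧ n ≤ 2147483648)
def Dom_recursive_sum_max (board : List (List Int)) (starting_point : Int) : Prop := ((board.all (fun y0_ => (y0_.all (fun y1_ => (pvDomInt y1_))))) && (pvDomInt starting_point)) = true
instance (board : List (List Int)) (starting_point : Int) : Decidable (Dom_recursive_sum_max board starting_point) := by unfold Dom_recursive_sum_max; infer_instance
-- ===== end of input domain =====

-- B replaces A's recursion by an explicit accumulating loop (a fold): simpler, constant stack.
-- A empties `board` in place via pop(0); B mimics that mutation, the equivalence proved here is about the return value.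

-- ===== PORT A =====
-- literal transliteration of A's recursion; the `none` branches are the ValueError/IndexError
-- cases (empty row), excluded by Pre_.
def recursive_sum_max : List (List Int) → Int → Int
  | [], _ => 0
  | curr_row :: rest, starting_point =>
    match PySem.List.max? curr_row (fun x => x) with
    | none => 0
    | some mx =>
      match PySem.List.index? curr_row mx with
      | none => 0
      | some curr_max_index =>
        match PySem.List.pyGet? curr_row (curr_max_index : Int) with
        | none => 0
        | some max_value =>
          let adjustment : Int := -1 * (if (curr_max_index : Int) ≠ starting_point then 1 else 0)
          max_value + adjustment + recursive_sum_max rest (curr_max_index : Int)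

-- ===== PORT B =====
-- the while-loop of Source B as a fold over the rows, state = (total, starting_point)
def altStep (st : Int × Int) (row : List Int) : Int × Int :=
  match PySem.List.max? row (fun x => x) with
  | none => st   -- empty row: ValueError, excluded by Pre_
  | some m =>
    match PySem.List.index? row m with
    | none => st
    | some i => (st.1 + m - (if (i : Int) ≠ st.2 then 1 else 0), (i : Int))

def recursive_sum_max_alt (board : List (List Int)) (starting_point : Int) : Int :=
  (board.foldl altStep (0, starting_point)).1

-- ===== PRECONDITION & SPEC =====
-- A (and B) raise ValueError on max([]) when some row is empty; Pre_ excludes exactly that.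
def Pre_recursive_sum_max (board : List (List Int)) (starting_point : Int) : Prop :=
  ∀ row ∈ board, row ≠ []
instance (board : List (List Int)) (starting_point : Int) : Decidable (Pre_recursive_sum_max board starting_point) := by unfold Pre_recursive_sum_max; infer_instance
def pvWitness_recursive_sum_max : List (List Int) × Int := ([[1, 3, 2], [5, 4]], 0)

def Spec_recursive_sum_max (board : List (List Int)) (starting_point : Int) (out : Int) : Prop := out = recursive_sum_max_alt board starting_point
instance (board : List (List Int)) (starting_point : Int) (out : Int) : Decidable (Spec_recursive_sum_max board starting_point out) := by unfold Spec_recursive_sum_max; infer_instance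

-- ===== CLAIM (what is proved, stated in full; the proofs are below) =====
def Claim_equal_recursive_sum_max : Prop := ∀ (board : List (List Int)) (starting_point : Int), Dom_recursive_sum_max board starting_point → Pre_recursive_sum_max board starting_point → Spec_recursive_sum_max board starting_point (recursive_sum_max board starting_point)

-- ===== LEMMAS AND PROOFS =====

-- one step of B's loop, split into its delta and next starting point
theorem altStep_eq (t sp : Int) (row : List Int) :
    altStep (t, sp) row = (t + (altStep (0, sp) row).1, (altStep (0, sp) row).2) := by
  unfold altStep
  cases hm : PySem.List.max? row (fun x => x) with
  | none => simp
  | some m =>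
    cases hi : PySem.List.index? row m with
    | none =>
      rw [PySem.List.index?_eq_idxOf?] at hi
      simp [hi]
    | some i =>
      rw [PySem.List.index?_eq_idxOf?] at hi
      simp [hi]; ring

-- B's fold shifted by an initial total: the accumulator is additive in its first component.
theorem alt_foldl_shift (board : List (List Int)) (t sp : Int) :
    (board.foldl altStep (t, sp)).1 = t + recursive_sum_max_alt board sp := by
  induction board generalizing t sp with
  | nil => simp [recursive_sum_max_alt]
  | cons r rest ih =>
    simp only [recursive_sum_max_alt, List.foldl_cons]
    rw [altStep_eq, altStep_eq 0 sp]
    rw [ih, ih]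
    ring

theorem recursive_sum_max_spec' (board : List (List Int)) (starting_point : Int)
    (hpre : Pre_recursive_sum_max board starting_point) :
    recursive_sum_max board starting_point = recursive_sum_max_alt board starting_point := by
  induction board generalizing starting_point with
  | nil => simp [recursive_sum_max, recursive_sum_max_alt]
  | cons r rest ih =>
    have hr : r ≠ [] := hpre r (by simp)
    have hrest : Pre_recursive_sum_max rest starting_point := fun row h => hpre row (by simp [h])
    obtain ⟨m, hm⟩ : ∃ m, PySem.List.max? r (fun x => x) = some m := by
      cases h : PySem.List.max? r (fun x => x) with
      | none => exact absurd ((PySem.List.max?_eq_none_iff r (fun x => x)).mp h) hr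
      | some m => exact ⟨m, rfl⟩
    have hmem : m ∈ r := PySem.List.max?_mem hm
    obtain ⟨i, hi⟩ : ∃ i, PySem.List.index? r m = some i := by
      cases h : PySem.List.index? r m with
      | none => exact absurd ((PySem.List.index?_eq_none_iff r m).mp h) (not_not_intro hmem)
      | some i => exact ⟨i, rfl⟩
    obtain ⟨hlt, hget, -⟩ := PySem.List.getElem_of_index?_eq_some hi
    have hg : PySem.List.pyGet? r (i : Int) = some m := by
      rw [PySem.List.pyGet?_natCast]
      simp [List.getElem?_eq_getElem hlt, hget]
    simp only [recursive_sum_max, hm, hi, hg]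
    rw [ih (i : Int) (fun row h => hpre row (by simp [h]))]
    show _ = (List.foldl altStep (0, starting_point) (r :: rest)).1
    rw [List.foldl_cons, altStep_eq]
    rw [alt_foldl_shift]
    simp only [altStep, hm, hi]
    ring

-- ===== VERDICT (by name: the statement is the Claim_ definition above) =====
theorem recursive_sum_max_spec : Claim_equal_recursive_sum_max := by
  intro board sp _ hpre
  exact recursive_sum_max_spec' board sp hpre
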